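-- pv_equiv track=rewrite | github.com/akash777js/Tml | main.py | categorize_urls
-- ===== SOURCE A (Python) =====
-- def categorize_urls(urls):
--     videos = []
--     pdfs = []
--     others = []
--
--     for name, url in urls:
--         new_url = url
--         if "media-cdn.classplusapp.com/" in url or "cpvod.testbook" in url:
--             new_url = f"https://api.extractor.workers.dev/player?url={url}"
--             videos.append((name, new_url))
--
--         elif "media-cdn.classplusapp.com/alisg-cdn-a.classplusapp.com/" in url or "media-cdn.classplusapp.com/1681/" in url or "media-cdn.classplusapp.com/tencent/" in url:
--             vid_id = url.split("/")[-2]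
--             new_url = f"https://dragoapi.vercel.app/video/{url}"
--             videos.append((name, new_url))
--
--         elif "akamaized.net/" in url or "1942403233.rsc.cdn77.org/" in url:
--             vid_id = url.split("/")[-2]
--             new_url = f"https://www.khanglobalstudies.com/player?src={url}"
--             videos.append((name, new_url))
--
--
--         elif "/master.mpd" in url:
--             vid_id = url.split("/")[-2]
--             new_url = f"https://player.muftukmall.site/?id={vid_id}"
--             videos.append((name, new_url))
--
--         elif ".zip" in url:
--             vid_id = url.split("/")[-2]
--             new_url = f"https://video.pablocoder.eu.org/appx-zip?url={url}"
--             videos.append((name, new_url))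
--
--         elif "d1d34p8vz63oiq.cloudfront.net/" in url:
--             vid_id = url.split("/")[-2]
--             new_url = f"https://anonymouspwplayer-b99f57957198.herokuapp.com/pw?url={video_url}?token={your_working_token}"
--             videos.append((name, new_url))
--
--         elif "youtube.com/embed" in url:
--             yt_id = url.split("/")[-1]
--             new_url = f"https://www.youtube.com/watch?v={yt_id}"
--
--         elif ".m3u8" in url:
--             videos.append((name, url))
--         elif ".mp4" in url:
--             videos.append((name, url))
--         elif "pdf" in url:
--             pdfs.append((name, url))
--         else:
--             others.append((name, url))
--
--     return videos, pdfs, others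
-- ===== SOURCE B (Python) =====
-- def _classify(name, url):
--     """Classify one (name, url) pair: returns (tag, item) with tag in {'v','p','o'}."""
--     if "media-cdn.classplusapp.com/" in url or "cpvod.testbook" in url:
--         return "v", (name, f"https://api.extractor.workers.dev/player?url={url}")
--     if "akamaized.net/" in url or "1942403233.rsc.cdn77.org/" in url:
--         return "v", (name, f"https://www.khanglobalstudies.com/player?src={url}")
--     if "/master.mpd" in url:
--         return "v", (name, f"https://player.muftukmall.site/?id={url.split('/')[-2]}")
--     if ".zip" in url:
--         return "v", (name, f"https://video.pablocoder.eu.org/appx-zip?url={url}")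
--     if "youtube.com/embed" in url:
--         return "v", (name, f"https://www.youtube.com/watch?v={url.split('/')[-1]}")
--     if ".m3u8" in url or ".mp4" in url:
--         return "v", (name, url)
--     if "pdf" in url:
--         return "p", (name, url)
--     return "o", (name, url)
--
--
-- def categorize_urls(urls):
--     tagged = [_classify(name, url) for name, url in urls]
--     return ([item for tag, item in tagged if tag == "v"],
--             [item for tag, item in tagged if tag == "p"],
--             [item for tag, item in tagged if tag == "o"])
-- ===== Notes on version B (the rewrite author's own statement) =====
-- stated objective: idiomatic
-- what changed: A's single imperative loop with three append targets, a dead second branch and a forgotten append becomes a pure per-item classifier returning a (tag, item) pair plus a map-then-three-filters partition of the tagged list; the dead classplusapp branch and the crashing cloudfront branch are dropped.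
-- intended difference: On inputs containing a url with 'youtube.com/embed' that matches no earlier rule, A computes the watch-URL but forgets to append it and silently drops the entry, while B puts the transformed (name, watch-URL) into videos, which is evidently what the branch intended. — e.g. on categorize_urls([("a", "youtube.com/embed/xyz")]): A returns ([], [], []), B returns ([("a", "https://www.youtube.com/watch?v=xyz")], [], [])
import Mathlib
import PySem

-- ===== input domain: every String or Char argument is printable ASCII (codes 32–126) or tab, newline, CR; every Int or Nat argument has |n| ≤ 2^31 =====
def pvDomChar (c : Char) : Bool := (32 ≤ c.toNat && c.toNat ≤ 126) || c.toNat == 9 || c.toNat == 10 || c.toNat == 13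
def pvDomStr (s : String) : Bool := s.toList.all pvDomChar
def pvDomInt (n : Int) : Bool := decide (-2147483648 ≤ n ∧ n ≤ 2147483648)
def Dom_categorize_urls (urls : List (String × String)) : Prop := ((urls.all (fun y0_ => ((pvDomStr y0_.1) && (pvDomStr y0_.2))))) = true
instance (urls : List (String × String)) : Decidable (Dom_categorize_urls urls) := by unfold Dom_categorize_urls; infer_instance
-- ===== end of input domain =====

-- B replaces A's imperative three-append loop by a pure per-item classifier plus a map-then-filter
-- partition (idiomatic, same cost); A's forgotten append on the youtube-embed branch is an intended
-- difference (D_), and A's two crashing branches (cloudfront NameError, slash-less .zip IndexError)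
-- are excluded by Pre_.


-- ===== PORT A =====
-- one iteration of A's loop over the state (videos, pdfs, others); branches in A's order
def pvAStep (st : (List (String × String)) × (List (String × String)) × (List (String × String)))
    (pair : String × String) :
    (List (String × String)) × (List (String × String)) × (List (String × String)) :=
  let (videos, pdfs, others) := st
  let (name, url) := pair
  if PySem.Str.isIn "media-cdn.classplusapp.com/" url || PySem.Str.isIn "cpvod.testbook" url then
    (videos ++ [(name, "https://api.extractor.workers.dev/player?url=" ++ url)], pdfs, others)
  else if PySem.Str.isIn "media-cdn.classplusapp.com/alisg-cdn-a.classplusapp.com/" url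
      || PySem.Str.isIn "media-cdn.classplusapp.com/1681/" url
      || PySem.Str.isIn "media-cdn.classplusapp.com/tencent/" url then
    -- A computes vid_id = url.split("/")[-2] here and does not use it; the url contains "/",
    -- so the index access cannot raise (getD is never hit)
    let _vid_id := (PySem.List.pyGet? ((PySem.Str.split? url "/").getD []) (-2)).getD ""
    (videos ++ [(name, "https://dragoapi.vercel.app/video/" ++ url)], pdfs, others)
  else if PySem.Str.isIn "akamaized.net/" url || PySem.Str.isIn "1942403233.rsc.cdn77.org/" url then
    let _vid_id := (PySem.List.pyGet? ((PySem.Str.split? url "/").getD []) (-2)).getD ""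
    (videos ++ [(name, "https://www.khanglobalstudies.com/player?src=" ++ url)], pdfs, others)
  else if PySem.Str.isIn "/master.mpd" url then
    let vid_id := (PySem.List.pyGet? ((PySem.Str.split? url "/").getD []) (-2)).getD ""
    (videos ++ [(name, "https://player.muftukmall.site/?id=" ++ vid_id)], pdfs, others)
  else if PySem.Str.isIn ".zip" url then
    -- A's unused vid_id raises IndexError when url has no "/" — those inputs are outside Pre_
    let _vid_id := (PySem.List.pyGet? ((PySem.Str.split? url "/").getD []) (-2)).getD ""
    (videos ++ [(name, "https://video.pablocoder.eu.org/appx-zip?url=" ++ url)], pdfs, others)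
  else if PySem.Str.isIn "d1d34p8vz63oiq.cloudfront.net/" url then
    -- A raises NameError here (video_url / your_working_token undefined) — outside Pre_
    (videos ++ [(name, "")], pdfs, others)
  else if PySem.Str.isIn "youtube.com/embed" url then
    -- A computes new_url but appends it to no list: the pair is dropped
    let _new_url := "https://www.youtube.com/watch?v="
      ++ (PySem.List.pyGet? ((PySem.Str.split? url "/").getD []) (-1)).getD ""
    (videos, pdfs, others)
  else if PySem.Str.isIn ".m3u8" url then
    (videos ++ [(name, url)], pdfs, others)
  else if PySem.Str.isIn ".mp4" url then
    (videos ++ [(name, url)], pdfs, others)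
  else if PySem.Str.isIn "pdf" url then
    (videos, pdfs ++ [(name, url)], others)
  else
    (videos, pdfs, others ++ [(name, url)])

def categorize_urls (urls : List (String × String)) :
    (List (String × String)) × (List (String × String)) × (List (String × String)) :=
  urls.foldl pvAStep ([], [], [])

-- ===== PORT B =====
-- B's pure classifier: one (name, url) pair ↦ (tag, transformed item), tag ∈ {"v","p","o"}
def pvClassify (name url : String) : String × (String × String) :=
  if PySem.Str.isIn "media-cdn.classplusapp.com/" url || PySem.Str.isIn "cpvod.testbook" url then
    ("v", (name, "https://api.extractor.workers.dev/player?url=" ++ url))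
  else if PySem.Str.isIn "akamaized.net/" url || PySem.Str.isIn "1942403233.rsc.cdn77.org/" url then
    ("v", (name, "https://www.khanglobalstudies.com/player?src=" ++ url))
  else if PySem.Str.isIn "/master.mpd" url then
    ("v", (name, "https://player.muftukmall.site/?id="
      ++ (PySem.List.pyGet? ((PySem.Str.split? url "/").getD []) (-2)).getD ""))
  else if PySem.Str.isIn ".zip" url then
    ("v", (name, "https://video.pablocoder.eu.org/appx-zip?url=" ++ url))
  else if PySem.Str.isIn "youtube.com/embed" url then
    ("v", (name, "https://www.youtube.com/watch?v="
      ++ (PySem.List.pyGet? ((PySem.Str.split? url "/").getD []) (-1)).getD ""))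
  else if PySem.Str.isIn ".m3u8" url || PySem.Str.isIn ".mp4" url then
    ("v", (name, url))
  else if PySem.Str.isIn "pdf" url then
    ("p", (name, url))
  else
    ("o", (name, url))

def categorize_urls_alt (urls : List (String × String)) :
    (List (String × String)) × (List (String × String)) × (List (String × String)) :=
  let tagged := urls.map (fun p => pvClassify p.1 p.2)
  (tagged.filterMap (fun ti => if ti.1 == "v" then some ti.2 else none),
   tagged.filterMap (fun ti => if ti.1 == "p" then some ti.2 else none),
   tagged.filterMap (fun ti => if ti.1 == "o" then some ti.2 else none))

-- ===== PRECONDITION & SPEC =====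
-- Pre_ excludes exactly the inputs on which A raises: a url reaching the cloudfront branch
-- (NameError on the undefined video_url) or a url with ".zip" but no "/" and no "cpvod.testbook"
-- (IndexError from the unused url.split("/")[-2]).
def pvBadUrl (u : String) : Bool :=
  (PySem.Str.isIn "d1d34p8vz63oiq.cloudfront.net/" u
    && !PySem.Str.isIn "media-cdn.classplusapp.com/" u && !PySem.Str.isIn "cpvod.testbook" u
    && !PySem.Str.isIn "akamaized.net/" u && !PySem.Str.isIn "1942403233.rsc.cdn77.org/" u
    && !PySem.Str.isIn "/master.mpd" u && !PySem.Str.isIn ".zip" u)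
  || (PySem.Str.isIn ".zip" u && !PySem.Str.isIn "cpvod.testbook" u && !PySem.Str.isIn "/" u)

def Pre_categorize_urls (urls : List (String × String)) : Prop :=
  ∀ p ∈ urls, pvBadUrl p.2 = false
instance (urls : List (String × String)) : Decidable (Pre_categorize_urls urls) := by
  unfold Pre_categorize_urls; infer_instance

def pvWitness_categorize_urls : (List (String × String)) :=
  [("n", "doc.pdf"), ("m", "http://x/a/master.mpd"), ("k", "a/b.zip")]

-- On inputs containing a url with "youtube.com/embed" matching no earlier rule, A computes the
-- watch-URL but forgets the append and silently drops the entry; B appends (name, watch-URL) to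
-- videos, which is evidently what the branch intended.
def pvYtUrl (u : String) : Bool :=
  PySem.Str.isIn "youtube.com/embed" u
    && !PySem.Str.isIn "media-cdn.classplusapp.com/" u && !PySem.Str.isIn "cpvod.testbook" u
    && !PySem.Str.isIn "akamaized.net/" u && !PySem.Str.isIn "1942403233.rsc.cdn77.org/" u
    && !PySem.Str.isIn "/master.mpd" u && !PySem.Str.isIn ".zip" u
    && !PySem.Str.isIn "d1d34p8vz63oiq.cloudfront.net/" u

def D_categorize_urls (urls : List (String × String)) : Prop :=
  ∃ p ∈ urls, pvYtUrl p.2 = true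
instance (urls : List (String × String)) : Decidable (D_categorize_urls urls) := by
  unfold D_categorize_urls; infer_instance

def Spec_categorize_urls (urls : List (String × String))
    (out : (List (String × String)) × (List (String × String)) × (List (String × String))) : Prop :=
  ¬ D_categorize_urls urls → out = categorize_urls_alt urls
instance (urls : List (String × String))
    (out : (List (String × String)) × (List (String × String)) × (List (String × String))) :
    Decidable (Spec_categorize_urls urls out) := by unfold Spec_categorize_urls; infer_instance

def pvDiffWitness_categorize_urls : (List (String × String)) := [("a", "youtube.com/embed/xyz")]
def pvDiffWitnessOut_categorize_urls :
    ((List (String × String)) × (List (String × String)) × (List (String × String))) ×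
    ((List (String × String)) × (List (String × String)) × (List (String × String))) :=
  (([], [], []), ([("a", "https://www.youtube.com/watch?v=xyz")], [], []))

-- ===== CLAIM (what is proved, stated in full; the proofs are below) =====
def Claim_unchanged_categorize_urls : Prop := ∀ (urls : List (String × String)), Dom_categorize_urls urls → Pre_categorize_urls urls → Spec_categorize_urls urls (categorize_urls urls)
def Claim_changed_categorize_urls : Prop := Dom_categorize_urls (pvDiffWitness_categorize_urls) ∧ Pre_categorize_urls (pvDiffWitness_categorize_urls) ∧ D_categorize_urls (pvDiffWitness_categorize_urls) ∧ categorize_urls (pvDiffWitness_categorize_urls) = pvDiffWitnessOut_categorize_urls.1 ∧ categorize_urls_alt (pvDiffWitness_categorize_urls) = pvDiffWitnessOut_categorize_urls.2 ∧ pvDiffWitnessOut_categorize_urls.1 ≠ pvDiffWitnessOut_categorize_urls.2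
def Claim_exact_categorize_urls : Prop := ∀ (urls : List (String × String)), Dom_categorize_urls urls → Pre_categorize_urls urls → D_categorize_urls urls → categorize_urls urls ≠ categorize_urls_alt urls

-- ===== LEMMAS AND PROOFS =====

-- sub-substring transfer: if a is an infix of b and b occurs in u, then a occurs in u
lemma pvIsIn_trans {a b u : String} (hab : a.toList <:+: b.toList)
    (h : PySem.Str.isIn b u = true) : PySem.Str.isIn a u = true := by
  rw [PySem.Str.isIn_iff_infix] at h ⊢
  exact hab.trans h

-- one loop iteration of A, on a pair that neither crashes A nor hits the forgotten append,
-- appends exactly B's classification of the pair to the matching component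
lemma pvStep_eq (v p o : List (String × String)) (name url : String)
    (hb : pvBadUrl url = false) (hy : pvYtUrl url = false) :
    pvAStep (v, p, o) (name, url) =
      (v ++ (if (pvClassify name url).1 == "v" then [(pvClassify name url).2] else []),
       p ++ (if (pvClassify name url).1 == "p" then [(pvClassify name url).2] else []),
       o ++ (if (pvClassify name url).1 == "o" then [(pvClassify name url).2] else [])) := by
  by_cases h1a : PySem.Str.isIn "media-cdn.classplusapp.com/" url = true
  · simp only [pvAStep, pvClassify, h1a, Bool.true_or, Bool.or_true, Bool.false_or, Bool.or_false]
    simp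
  rw [Bool.not_eq_true] at h1a
  by_cases h1b : PySem.Str.isIn "cpvod.testbook" url = true
  · simp only [pvAStep, pvClassify, h1b, Bool.true_or, Bool.or_true, Bool.false_or, Bool.or_false]
    simp
  rw [Bool.not_eq_true] at h1b
  -- A's second branch is dead: each of its three substrings contains the first branch's substring
  have h2a : PySem.Str.isIn "media-cdn.classplusapp.com/alisg-cdn-a.classplusapp.com/" url = false := by
    cases hh : PySem.Str.isIn "media-cdn.classplusapp.com/alisg-cdn-a.classplusapp.com/" url
    · rfl
    · exact absurd (pvIsIn_trans (a := "media-cdn.classplusapp.com/") (by decide) hh) (by rw [h1a]; decide)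
  have h2b : PySem.Str.isIn "media-cdn.classplusapp.com/1681/" url = false := by
    cases hh : PySem.Str.isIn "media-cdn.classplusapp.com/1681/" url
    · rfl
    · exact absurd (pvIsIn_trans (a := "media-cdn.classplusapp.com/") (by decide) hh) (by rw [h1a]; decide)
  have h2c : PySem.Str.isIn "media-cdn.classplusapp.com/tencent/" url = false := by
    cases hh : PySem.Str.isIn "media-cdn.classplusapp.com/tencent/" url
    · rfl
    · exact absurd (pvIsIn_trans (a := "media-cdn.classplusapp.com/") (by decide) hh) (by rw [h1a]; decide)
  by_cases h3a : PySem.Str.isIn "akamaized.net/" url = true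
  · simp only [pvAStep, pvClassify, h1a, h1b, h2a, h2b, h2c, h3a, Bool.true_or, Bool.or_true, Bool.false_or, Bool.or_false]
    simp
  rw [Bool.not_eq_true] at h3a
  by_cases h3b : PySem.Str.isIn "1942403233.rsc.cdn77.org/" url = true
  · simp only [pvAStep, pvClassify, h1a, h1b, h2a, h2b, h2c, h3b, Bool.true_or, Bool.or_true, Bool.false_or, Bool.or_false]
    simp
  rw [Bool.not_eq_true] at h3b
  by_cases h4 : PySem.Str.isIn "/master.mpd" url = true
  · simp only [pvAStep, pvClassify, h1a, h1b, h2a, h2b, h2c, h3a, h3b, h4, Bool.true_or, Bool.or_true, Bool.false_or, Bool.or_false]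
    simp
  rw [Bool.not_eq_true] at h4
  by_cases h5 : PySem.Str.isIn ".zip" url = true
  · simp only [pvAStep, pvClassify, h1a, h1b, h2a, h2b, h2c, h3a, h3b, h4, h5, Bool.true_or, Bool.or_true, Bool.false_or, Bool.or_false]
    simp
  rw [Bool.not_eq_true] at h5
  -- no crash (hb): with all earlier branches false, the cloudfront branch cannot fire
  have h6 : PySem.Str.isIn "d1d34p8vz63oiq.cloudfront.net/" url = false := by
    revert hb
    simp only [pvBadUrl, h1a, h1b, h3a, h3b, h4, h5]
    simp
  -- no dropped pair (hy): the youtube-embed branch cannot fire either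
  have h7 : PySem.Str.isIn "youtube.com/embed" url = false := by
    revert hy
    simp only [pvYtUrl, h1a, h1b, h3a, h3b, h4, h5, h6]
    simp
  by_cases h8 : PySem.Str.isIn ".m3u8" url = true
  · simp only [pvAStep, pvClassify, h1a, h1b, h2a, h2b, h2c, h3a, h3b, h4, h5, h6, h7, h8, Bool.true_or, Bool.or_true, Bool.false_or, Bool.or_false]
    simp
  rw [Bool.not_eq_true] at h8
  by_cases h9 : PySem.Str.isIn ".mp4" url = true
  · simp only [pvAStep, pvClassify, h1a, h1b, h2a, h2b, h2c, h3a, h3b, h4, h5, h6, h7, h8, h9, Bool.true_or, Bool.or_true, Bool.false_or, Bool.or_false]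
    simp
  rw [Bool.not_eq_true] at h9
  by_cases h10 : PySem.Str.isIn "pdf" url = true
  · simp only [pvAStep, pvClassify, h1a, h1b, h2a, h2b, h2c, h3a, h3b, h4, h5, h6, h7, h8, h9, h10, Bool.true_or, Bool.or_true, Bool.false_or, Bool.or_false]
    simp
  rw [Bool.not_eq_true] at h10
  simp only [pvAStep, pvClassify, h1a, h1b, h2a, h2b, h2c, h3a, h3b, h4, h5, h6, h7, h8, h9, h10,
    Bool.true_or, Bool.or_true, Bool.false_or, Bool.or_false]
  simp

-- A's fold from any state, over a list with no crashing and no dropped pair,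
-- appends B's three filtered lists
lemma pvFold_eq (urls : List (String × String)) :
    ∀ v p o : List (String × String),
    (∀ q ∈ urls, pvBadUrl q.2 = false) → (∀ q ∈ urls, pvYtUrl q.2 = false) →
    urls.foldl pvAStep (v, p, o) =
      (v ++ (categorize_urls_alt urls).1,
       p ++ (categorize_urls_alt urls).2.1,
       o ++ (categorize_urls_alt urls).2.2) := by
  induction urls with
  | nil => intro v p o _ _; simp [categorize_urls_alt]
  | cons hd tl ih =>
    intro v p o hb hy
    obtain ⟨n, u⟩ := hd
    rw [List.foldl_cons,
      pvStep_eq v p o n u (hb (n, u) (List.mem_cons_self)) (hy (n, u) (List.mem_cons_self)),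
      ih _ _ _ (fun q hq => hb q (List.mem_cons_of_mem _ hq))
        (fun q hq => hy q (List.mem_cons_of_mem _ hq))]
    simp only [categorize_urls_alt, List.map_cons, List.filterMap_cons]
    by_cases h1 : (pvClassify n u).1 == "v" <;> by_cases h2 : (pvClassify n u).1 == "p" <;>
      by_cases h3 : (pvClassify n u).1 == "o" <;> simp_all

-- ===== tightness: inside D_ the two results always differ (the videos lists have different lengths) =====

-- the condition under which A's loop appends the current pair to videos (branches 1–6 and, when the
-- youtube branch does not fire, the .m3u8/.mp4 branches), with A's exact bracketing
def pvAVid (u : String) : Bool :=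
  (PySem.Str.isIn "media-cdn.classplusapp.com/" u || PySem.Str.isIn "cpvod.testbook" u)
  || ((PySem.Str.isIn "media-cdn.classplusapp.com/alisg-cdn-a.classplusapp.com/" u
        || PySem.Str.isIn "media-cdn.classplusapp.com/1681/" u)
      || PySem.Str.isIn "media-cdn.classplusapp.com/tencent/" u)
  || (PySem.Str.isIn "akamaized.net/" u || PySem.Str.isIn "1942403233.rsc.cdn77.org/" u)
  || PySem.Str.isIn "/master.mpd" u
  || PySem.Str.isIn ".zip" u
  || PySem.Str.isIn "d1d34p8vz63oiq.cloudfront.net/" u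
  || (!PySem.Str.isIn "youtube.com/embed" u
      && (PySem.Str.isIn ".m3u8" u || PySem.Str.isIn ".mp4" u))

lemma pvAStep_fst_len (v p o : List (String × String)) (n u : String) :
    ((pvAStep (v, p, o) (n, u)).1).length = v.length + (if pvAVid u then 1 else 0) := by
  simp only [pvAStep, pvAVid]
  split_ifs <;> simp_all

lemma pvFoldA_len (urls : List (String × String)) :
    ∀ v p o : List (String × String),
    ((urls.foldl pvAStep (v, p, o)).1).length =
      v.length + urls.countP (fun q => pvAVid q.2) := by
  induction urls with
  | nil => intro v p o; simp
  | cons hd tl ih =>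
    intro v p o
    obtain ⟨n, u⟩ := hd
    rw [List.foldl_cons]
    have h := ih (pvAStep (v, p, o) (n, u)).1 (pvAStep (v, p, o) (n, u)).2.1
      (pvAStep (v, p, o) (n, u)).2.2
    rw [List.countP_cons]
    have hs := pvAStep_fst_len v p o n u
    simp only at h
    rw [show ((pvAStep (v, p, o) (n, u)).1, (pvAStep (v, p, o) (n, u)).2.1,
      (pvAStep (v, p, o) (n, u)).2.2) = pvAStep (v, p, o) (n, u) from rfl] at h
    rw [h, hs]
    by_cases hp : pvAVid u = true <;> simp [hp] <;> omega

lemma pvFilterTag_len {beta : Type} (t : String) (l : List (String × beta)) :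
    (l.filterMap (fun ti => if ti.1 == t then some ti.2 else none)).length =
      l.countP (fun ti => ti.1 == t) := by
  induction l with
  | nil => rfl
  | cons a l ih =>
    rw [List.filterMap_cons, List.countP_cons]
    by_cases h : a.1 = t
    · simp [h]
      simpa using ih
    · simp [h]
      simpa using ih

lemma pvAltVid_len (urls : List (String × String)) :
    ((categorize_urls_alt urls).1).length =
      urls.countP (fun q => (pvClassify q.1 q.2).1 == "v") := by
  simp only [categorize_urls_alt]
  rw [pvFilterTag_len, List.countP_map]
  congr 1

-- under Pre_, every pair A puts into videos is tagged "v" by B's classifier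
lemma pvTag_of_avid (n u : String) (hb : pvBadUrl u = false) (ha : pvAVid u = true) :
    ((pvClassify n u).1 == "v") = true := by
  by_cases h1a : PySem.Str.isIn "media-cdn.classplusapp.com/" u = true
  · simp only [pvClassify, h1a, Bool.true_or]
    simp
  rw [Bool.not_eq_true] at h1a
  by_cases h1b : PySem.Str.isIn "cpvod.testbook" u = true
  · simp only [pvClassify, h1b, Bool.or_true]
    simp
  rw [Bool.not_eq_true] at h1b
  by_cases h3a : PySem.Str.isIn "akamaized.net/" u = true
  · simp only [pvClassify, h1a, h1b, h3a, Bool.true_or, Bool.false_or, Bool.or_false]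
    simp
  rw [Bool.not_eq_true] at h3a
  by_cases h3b : PySem.Str.isIn "1942403233.rsc.cdn77.org/" u = true
  · simp only [pvClassify, h1a, h1b, h3b, Bool.or_true, Bool.false_or, Bool.or_false]
    simp
  rw [Bool.not_eq_true] at h3b
  by_cases h4 : PySem.Str.isIn "/master.mpd" u = true
  · simp only [pvClassify, h1a, h1b, h3a, h3b, h4, Bool.false_or, Bool.or_false]
    simp
  rw [Bool.not_eq_true] at h4
  by_cases h5 : PySem.Str.isIn ".zip" u = true
  · simp only [pvClassify, h1a, h1b, h3a, h3b, h4, h5, Bool.false_or, Bool.or_false]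
    simp
  rw [Bool.not_eq_true] at h5
  by_cases h7 : PySem.Str.isIn "youtube.com/embed" u = true
  · simp only [pvClassify, h1a, h1b, h3a, h3b, h4, h5, h7, Bool.false_or, Bool.or_false]
    simp
  rw [Bool.not_eq_true] at h7
  by_cases h8 : PySem.Str.isIn ".m3u8" u = true
  · simp only [pvClassify, h1a, h1b, h3a, h3b, h4, h5, h7, h8, Bool.true_or, Bool.false_or, Bool.or_false]
    simp
  rw [Bool.not_eq_true] at h8
  by_cases h9 : PySem.Str.isIn ".mp4" u = true
  · simp only [pvClassify, h1a, h1b, h3a, h3b, h4, h5, h7, h8, h9, Bool.or_true, Bool.false_or, Bool.or_false]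
    simp
  rw [Bool.not_eq_true] at h9
  -- no classifier video rule fires: then no A video branch can fire either — contradiction with ha
  have h2a : PySem.Str.isIn "media-cdn.classplusapp.com/alisg-cdn-a.classplusapp.com/" u = false := by
    cases hh : PySem.Str.isIn "media-cdn.classplusapp.com/alisg-cdn-a.classplusapp.com/" u
    · rfl
    · exact absurd (pvIsIn_trans (a := "media-cdn.classplusapp.com/") (by decide) hh) (by rw [h1a]; decide)
  have h2b : PySem.Str.isIn "media-cdn.classplusapp.com/1681/" u = false := by
    cases hh : PySem.Str.isIn "media-cdn.classplusapp.com/1681/" u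
    · rfl
    · exact absurd (pvIsIn_trans (a := "media-cdn.classplusapp.com/") (by decide) hh) (by rw [h1a]; decide)
  have h2c : PySem.Str.isIn "media-cdn.classplusapp.com/tencent/" u = false := by
    cases hh : PySem.Str.isIn "media-cdn.classplusapp.com/tencent/" u
    · rfl
    · exact absurd (pvIsIn_trans (a := "media-cdn.classplusapp.com/") (by decide) hh) (by rw [h1a]; decide)
  have h6 : PySem.Str.isIn "d1d34p8vz63oiq.cloudfront.net/" u = false := by
    revert hb
    simp only [pvBadUrl, h1a, h1b, h3a, h3b, h4, h5]
    simp
  rw [pvAVid, h1a, h1b, h2a, h2b, h2c, h3a, h3b, h4, h5, h6, h7, h8, h9] at ha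
  simp at ha

-- a dropped youtube pair is tagged "v" by B but appended to no list by A
lemma pvYt_facts (n u : String) (hy : pvYtUrl u = true) :
    pvAVid u = false ∧ ((pvClassify n u).1 == "v") = true := by
  simp only [pvYtUrl, Bool.and_eq_true, Bool.not_eq_true'] at hy
  obtain ⟨⟨⟨⟨⟨⟨⟨h7, h1a⟩, h1b⟩, h3a⟩, h3b⟩, h4⟩, h5⟩, h6⟩ := hy
  have h2a : PySem.Str.isIn "media-cdn.classplusapp.com/alisg-cdn-a.classplusapp.com/" u = false := by
    cases hh : PySem.Str.isIn "media-cdn.classplusapp.com/alisg-cdn-a.classplusapp.com/" u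
    · rfl
    · exact absurd (pvIsIn_trans (a := "media-cdn.classplusapp.com/") (by decide) hh) (by rw [h1a]; decide)
  have h2b : PySem.Str.isIn "media-cdn.classplusapp.com/1681/" u = false := by
    cases hh : PySem.Str.isIn "media-cdn.classplusapp.com/1681/" u
    · rfl
    · exact absurd (pvIsIn_trans (a := "media-cdn.classplusapp.com/") (by decide) hh) (by rw [h1a]; decide)
  have h2c : PySem.Str.isIn "media-cdn.classplusapp.com/tencent/" u = false := by
    cases hh : PySem.Str.isIn "media-cdn.classplusapp.com/tencent/" u
    · rfl
    · exact absurd (pvIsIn_trans (a := "media-cdn.classplusapp.com/") (by decide) hh) (by rw [h1a]; decide)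
  constructor
  · rw [pvAVid, h1a, h1b, h2a, h2b, h2c, h3a, h3b, h4, h5, h6, h7]
    simp
  · simp only [pvClassify, h1a, h1b, h3a, h3b, h4, h5, h7, Bool.or_false, Bool.false_or]
    simp

-- strict countP comparison: pointwise p → q on the list plus one member with ¬p ∧ q
lemma pvCountP_lt {α : Type} (p q : α → Bool) (l : List α)
    (hmono : ∀ x ∈ l, p x = true → q x = true) (x0 : α) (hx0 : x0 ∈ l)
    (hp : p x0 = false) (hq : q x0 = true) : l.countP p < l.countP q := by
  induction l with
  | nil => cases hx0
  | cons a l ih =>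
    rw [List.countP_cons, List.countP_cons]
    rcases List.mem_cons.mp hx0 with rfl | hmem
    · have := List.countP_mono_left (l := l)
        (fun x hx => hmono x (List.mem_cons_of_mem _ hx))
      simp [hp, hq]
      omega
    · have h := ih (fun x hx hpx => hmono x (List.mem_cons_of_mem _ hx) hpx) hmem
      have hstep : (if p a then 1 else 0) ≤ (if q a then 1 else 0) := by
        by_cases hpa : p a = true
        · simp [hpa, hmono a List.mem_cons_self hpa]
        · rw [Bool.not_eq_true] at hpa
          simp [hpa]
      omega

-- ===== VERDICT (by name: the statement is the Claim_ definition above) =====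
theorem categorize_urls_spec : Claim_unchanged_categorize_urls := by
  intro urls _ hpre hnD
  have hy : ∀ q ∈ urls, pvYtUrl q.2 = false := by
    intro q hq
    by_contra h
    exact hnD ⟨q, hq, by simpa using h⟩
  simpa using pvFold_eq urls [] [] [] hpre hy

theorem categorize_urls_changed : Claim_changed_categorize_urls := by
  unfold Claim_changed_categorize_urls; decide

set_option maxHeartbeats 1000000 in
theorem categorize_urls_tight : Claim_exact_categorize_urls := by
  intro urls _ hpre hD heq
  obtain ⟨q0, hq0, hyt⟩ := hD
  have hlenA : (categorize_urls urls).1.length = urls.countP (fun q => pvAVid q.2) := by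
    simpa [categorize_urls] using pvFoldA_len urls [] [] []
  have hlt : urls.countP (fun q => pvAVid q.2) <
      urls.countP (fun q => (pvClassify q.1 q.2).1 == "v") :=
    pvCountP_lt _ _ urls (fun x hx hax => pvTag_of_avid x.1 x.2 (hpre x hx) hax) q0 hq0
      (pvYt_facts q0.1 q0.2 hyt).1 (pvYt_facts q0.1 q0.2 hyt).2
  rw [heq, pvAltVid_len] at hlenA
  omega
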